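-- pv_equiv track=rewrite | github.com/MSFT-Codeforces/beacon_ladder_length | standard.py | maximum_beacons
-- ===== SOURCE A (Python) =====
-- import math
--
-- def is_length_feasible(
--     lower_bound: int,
--     upper_bound: int,
--     budget_sum: int,
--     length: int,
-- ) -> bool:
--     """Check whether a minimal beacon ladder of a given length is feasible.
--
--     Args:
--         lower_bound: Minimum allowed value for each element (l).
--         upper_bound: Maximum allowed value for each element (r).
--         budget_sum: Maximum allowed total sum of elements (S).
--         length: Candidate ladder length n.
--
--     Returns:
--         True if a valid beacon ladder of length `length` exists, otherwise False.
--     """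
--     last_value = lower_bound + (length * (length - 1)) // 2
--     if last_value > upper_bound:
--         return False
--
--     total_sum = (
--         length * lower_bound
--         + (length * (length + 1) * (length - 1)) // 6
--     )
--     return total_sum <= budget_sum
--
-- def maximum_beacons(lower_bound: int, upper_bound: int, budget_sum: int) -> int:
--     """Compute the maximum feasible beacon ladder length for one test case.
--
--     Args:
--         lower_bound: Minimum allowed value for each element (l).
--         upper_bound: Maximum allowed value for each element (r).
--         budget_sum: Maximum allowed total sum of elements (S).
--
--     Returns:
--         The maximum integer length n for which a valid beacon ladder exists.
--     """
--     range_width = upper_bound - lower_bound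
--
--     upper_from_range = (1 + math.isqrt(1 + 8 * range_width)) // 2 + 2
--     upper_from_sum = budget_sum // lower_bound + 1
--     high = min(upper_from_range, upper_from_sum)
--
--     low = 1
--     best_length = 1
--     while low <= high:
--         midpoint = (low + high) // 2
--         if is_length_feasible(
--             lower_bound=lower_bound,
--             upper_bound=upper_bound,
--             budget_sum=budget_sum,
--             length=midpoint,
--         ):
--             best_length = midpoint
--             low = midpoint + 1
--         else:
--             high = midpoint - 1
--
--     return best_length
-- ===== SOURCE B (Python) =====
-- import math
--
--
-- def maximum_beacons(lower_bound: int, upper_bound: int, budget_sum: int) -> int: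
--     """Linear feasibility scan with incremental running values instead of binary search."""
--     range_width = upper_bound - lower_bound
--
--     upper_from_range = (1 + math.isqrt(1 + 8 * range_width)) // 2 + 2
--     upper_from_sum = budget_sum // lower_bound + 1
--     high = min(upper_from_range, upper_from_sum)
--
--     best_length = 1
--     last_value = lower_bound   # minimal last element of a ladder of length n
--     total_sum = lower_bound    # minimal total sum of a ladder of length n
--     n = 1
--     while n <= high:
--         if last_value <= upper_bound and total_sum <= budget_sum:
--             best_length = n
--         n += 1
--         last_value += n - 1
--         total_sum += last_value
--     return best_length
-- ===== Notes on version B (the rewrite author's own statement) =====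
-- stated objective: alternative
-- what changed: Replaces the binary search over is_length_feasible by a single linear scan that maintains the minimal last element and minimal total sum incrementally (no per-step closed-form recomputation) and keeps the largest feasible length seen; this returns the true maximum even where the feasibility predicate is not monotone.
-- intended difference: When lower_bound < 0 and budget_sum < lower_bound while some length n >= 2 within the sum-derived search cap is feasible, the minimal total sum is not monotone in the length, so A's binary search probes only infeasible midpoints and returns 1 (not the maximum feasible length, e.g. 1 on (-8,-7,-15)); B's linear scan returns the true maximum feasible length (2 there), which is what the function's docstring promises. — e.g. on maximum_beacons(-8, -7, -15): A returns 1, B returns 2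
import Mathlib
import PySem

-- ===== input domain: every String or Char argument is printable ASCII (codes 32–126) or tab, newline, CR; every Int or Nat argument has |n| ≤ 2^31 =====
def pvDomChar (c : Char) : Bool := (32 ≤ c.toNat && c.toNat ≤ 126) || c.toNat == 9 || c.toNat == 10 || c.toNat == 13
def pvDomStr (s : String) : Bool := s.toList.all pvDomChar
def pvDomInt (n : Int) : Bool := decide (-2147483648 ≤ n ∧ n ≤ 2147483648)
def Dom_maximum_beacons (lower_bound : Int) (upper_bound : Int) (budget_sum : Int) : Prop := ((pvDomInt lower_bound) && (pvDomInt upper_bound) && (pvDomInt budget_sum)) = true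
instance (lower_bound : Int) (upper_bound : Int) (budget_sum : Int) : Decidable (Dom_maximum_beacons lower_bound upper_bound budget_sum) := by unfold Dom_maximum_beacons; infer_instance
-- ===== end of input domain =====

-- B replaces A's binary search by a linear feasibility scan with incrementally maintained
-- running values; on the non-monotone corner lower_bound < 0 ∧ budget_sum ≤ lower_bound it
-- returns the true maximum feasible length where A's binary search does not (stated as D_).

-- ===== PORT A =====
-- math.isqrt(x): exact for x ≥ 0 (Pre_ guarantees the argument is nonnegative; Python raises ValueError for x < 0)
def pyIsqrt (x : Int) : Int := (Nat.sqrt x.toNat : Int)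

def is_length_feasible (lower_bound upper_bound budget_sum length : Int) : Bool :=
  let last_value := lower_bound + PySem.Int.floordiv (length * (length - 1)) 2
  if last_value > upper_bound then false
  else decide (length * lower_bound + PySem.Int.floordiv (length * (length + 1) * (length - 1)) 6 ≤ budget_sum)

-- the while-loop of A, step for step
def mbLoop (lower_bound upper_bound budget_sum low high best : Int) : Int :=
  if h : low ≤ high then
    let midpoint := PySem.Int.floordiv (low + high) 2
    if is_length_feasible lower_bound upper_bound budget_sum midpoint then
      mbLoop lower_bound upper_bound budget_sum (midpoint + 1) high midpoint
    else
      mbLoop lower_bound upper_bound budget_sum low (midpoint - 1) best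
  else best
termination_by (high + 1 - low).toNat
decreasing_by
  · have hb := PySem.Int.floordiv_two_mid_bounds h
    omega
  · have hb := PySem.Int.floordiv_two_mid_bounds h
    omega

def maximum_beacons (lower_bound : Int) (upper_bound : Int) (budget_sum : Int) : Int :=
  let range_width := upper_bound - lower_bound
  let upper_from_range := PySem.Int.floordiv (1 + pyIsqrt (1 + 8 * range_width)) 2 + 2
  let upper_from_sum := PySem.Int.floordiv budget_sum lower_bound + 1
  let high := min upper_from_range upper_from_sum
  mbLoop lower_bound upper_bound budget_sum 1 high 1

-- ===== PORT B =====
-- the while-loop of B: n, best_length, and the incrementally maintained last_value / total_sum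
def mbScan (upper_bound budget_sum high n best last total : Int) : Int :=
  if h : n ≤ high then
    let best' := if last ≤ upper_bound ∧ total ≤ budget_sum then n else best
    mbScan upper_bound budget_sum high (n + 1) best' (last + n) (total + (last + n))
  else best
termination_by (high + 1 - n).toNat
decreasing_by omega

def maximum_beacons_alt (lower_bound : Int) (upper_bound : Int) (budget_sum : Int) : Int :=
  let range_width := upper_bound - lower_bound
  let upper_from_range := PySem.Int.floordiv (1 + pyIsqrt (1 + 8 * range_width)) 2 + 2
  let upper_from_sum := PySem.Int.floordiv budget_sum lower_bound + 1
  let high := min upper_from_range upper_from_sum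
  mbScan upper_bound budget_sum high 1 1 lower_bound lower_bound

-- ===== PRECONDITION & SPEC =====
-- Pre_ excludes exactly the inputs where A raises: lower_bound = 0 (ZeroDivisionError in
-- budget_sum // lower_bound) and upper_bound < lower_bound (math.isqrt of a negative, ValueError).
def Pre_maximum_beacons (lower_bound : Int) (upper_bound : Int) (budget_sum : Int) : Prop :=
  lower_bound ≠ 0 ∧ lower_bound ≤ upper_bound
instance (lower_bound : Int) (upper_bound : Int) (budget_sum : Int) : Decidable (Pre_maximum_beacons lower_bound upper_bound budget_sum) := by unfold Pre_maximum_beacons; infer_instance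

def pvWitness_maximum_beacons : Int × Int × Int := (1, 2, 3)

-- When lower_bound < 0 and budget_sum < lower_bound while a ladder of some length n ≥ 2 within the
-- search bound is feasible, A's binary search probes only infeasible midpoints and returns 1 instead of
-- the maximum feasible length; B's linear scan returns that maximum (≥ 2), as the docstring promises.
def D_maximum_beacons (lower_bound : Int) (upper_bound : Int) (budget_sum : Int) : Prop :=
  lower_bound < 0 ∧ budget_sum < lower_bound ∧
    let n := PySem.Int.floordiv budget_sum lower_bound + 1
    2 * lower_bound + n * (n - 1) ≤ 2 * upper_bound ∧
    6 * (n * lower_bound) + n * (n + 1) * (n - 1) ≤ 6 * budget_sum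
instance (lower_bound : Int) (upper_bound : Int) (budget_sum : Int) : Decidable (D_maximum_beacons lower_bound upper_bound budget_sum) := by unfold D_maximum_beacons; infer_instance

def Spec_maximum_beacons (lower_bound : Int) (upper_bound : Int) (budget_sum : Int) (out : Int) : Prop := ¬ D_maximum_beacons lower_bound upper_bound budget_sum → out = maximum_beacons_alt lower_bound upper_bound budget_sum
instance (lower_bound : Int) (upper_bound : Int) (budget_sum : Int) (out : Int) : Decidable (Spec_maximum_beacons lower_bound upper_bound budget_sum out) := by unfold Spec_maximum_beacons; infer_instance

def pvDiffWitness_maximum_beacons : Int × Int × Int := (-8, -7, -15)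
def pvDiffWitnessOut_maximum_beacons : Int × Int := (1, 2)

-- ===== CLAIM (what is proved, stated in full; the proofs are below) =====
def Claim_unchanged_maximum_beacons : Prop := ∀ (lower_bound : Int) (upper_bound : Int) (budget_sum : Int), Dom_maximum_beacons lower_bound upper_bound budget_sum → Pre_maximum_beacons lower_bound upper_bound budget_sum → Spec_maximum_beacons lower_bound upper_bound budget_sum (maximum_beacons lower_bound upper_bound budget_sum)
def Claim_changed_maximum_beacons : Prop := Dom_maximum_beacons (pvDiffWitness_maximum_beacons.1) (pvDiffWitness_maximum_beacons.2.1) (pvDiffWitness_maximum_beacons.2.2) ∧ Pre_maximum_beacons (pvDiffWitness_maximum_beacons.1) (pvDiffWitness_maximum_beacons.2.1) (pvDiffWitness_maximum_beacons.2.2) ∧ D_maximum_beacons (pvDiffWitness_maximum_beacons.1) (pvDiffWitness_maximum_beacons.2.1) (pvDiffWitness_maximum_beacons.2.2) ∧ maximum_beacons (pvDiffWitness_maximum_beacons.1) (pvDiffWitness_maximum_beacons.2.1) (pvDiffWitness_maximum_beacons.2.2) = pvDiffWitnessOut_maximum_beacons.1 ∧ maximum_beacons_alt (pvDiffWitness_maximum_beacons.1)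 (pvDiffWitness_maximum_beacons.2.1) (pvDiffWitness_maximum_beacons.2.2) = pvDiffWitnessOut_maximum_beacons.2 ∧ pvDiffWitnessOut_maximum_beacons.1 ≠ pvDiffWitnessOut_maximum_beacons.2

def Claim_exact_maximum_beacons : Prop := ∀ (lower_bound : Int) (upper_bound : Int) (budget_sum : Int), Dom_maximum_beacons lower_bound upper_bound budget_sum → Pre_maximum_beacons lower_bound upper_bound budget_sum → D_maximum_beacons lower_bound upper_bound budget_sum → maximum_beacons lower_bound upper_bound budget_sum ≠ maximum_beacons_alt lower_bound upper_bound budget_sum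

-- ===== LEMMAS AND PROOFS =====

-- the feasibility test of a ladder of length n, with the (exact) floor divisions cleared
def Qfeas (l r S n : Int) : Prop :=
  2 * l + n * (n - 1) ≤ 2 * r ∧ 6 * (n * l) + n * (n + 1) * (n - 1) ≤ 6 * S

lemma six_dvd_cube (n : Int) : ∃ k, n * (n + 1) * (n - 1) = 6 * k := by
  have h : ((n * (n + 1) * (n - 1) : Int) : ZMod 6) = 0 := by
    have h6 : ∀ b : ZMod 6, b * (b + 1) * (b - 1) = 0 := by decide
    push_cast
    exact h6 n
  obtain ⟨k, hk⟩ := (ZMod.intCast_zmod_eq_zero_iff_dvd _ 6).mp h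
  exact ⟨k, hk⟩

lemma feas_iff (l r S n : Int) :
    is_length_feasible l r S n = true ↔ Qfeas l r S n := by
  obtain ⟨a, ha⟩ : ∃ a, n * (n - 1) = 2 * a := by
    obtain ⟨a, ha⟩ := Int.even_mul_succ_self (n - 1)
    exact ⟨a, by linarith [ha]⟩
  obtain ⟨k, hk⟩ := six_dvd_cube n
  unfold is_length_feasible Qfeas
  rw [ha, hk, PySem.Int.floordiv_eq_iff_of_pos (b := 2) (q := a) (by omega) |>.mpr (by omega),
      PySem.Int.floordiv_eq_iff_of_pos (b := 6) (q := k) (by omega) |>.mpr (by omega)]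
  generalize n * l = m
  dsimp only
  split_ifs with hcmp
  · simp only [false_iff]
    omega
  · simp only [decide_eq_true_eq]
    omega

-- A's binary search on a threshold predicate
lemma mbLoop_thresh (l r S t H : Int)
    (ht : ∀ n, 1 ≤ n → n ≤ H → (Qfeas l r S n ↔ n ≤ t)) :
    ∀ (fuel : Nat) (low high best : Int), (high + 1 - low).toNat ≤ fuel →
      1 ≤ low → high ≤ H →
      mbLoop l r S low high best = if low ≤ high ∧ low ≤ t then min t high else best := by
  intro fuel
  induction fuel with
  | zero =>
    intro low high best hf h1 hH
    rw [mbLoop]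
    have h : ¬ low ≤ high := by omega
    simp [h]
  | succ f ih =>
    intro low high best hf h1 hH
    rw [mbLoop]
    by_cases hlh : low ≤ high
    case neg =>
      rw [dif_neg hlh, if_neg (by omega)]
    rw [dif_pos hlh]
    have hmid := PySem.Int.floordiv_two_mid_bounds hlh
    set mid := PySem.Int.floordiv (low + high) 2 with hmiddef
    dsimp only
    by_cases hfeas : is_length_feasible l r S mid = true
    · rw [if_pos hfeas]
      have hmt : mid ≤ t := (ht mid (by omega) (by omega)).mp ((feas_iff l r S mid).mp hfeas)
      rw [ih (mid + 1) high mid (by omega) (by omega) hH]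
      split_ifs <;> omega
    · rw [if_neg hfeas]
      have hmt : ¬ mid ≤ t := fun hle =>
        hfeas ((feas_iff l r S mid).mpr ((ht mid (by omega) (by omega)).mpr hle))
      rw [ih low (mid - 1) best (by omega) h1 (by omega)]
      split_ifs <;> omega

-- B's linear scan on a threshold predicate
lemma mbScan_thresh (l r S t high H : Int)
    (ht : ∀ n, 1 ≤ n → n ≤ H → (Qfeas l r S n ↔ n ≤ t)) (hH : high ≤ H) :
    ∀ (fuel : Nat) (n best last total : Int), (high + 1 - n).toNat ≤ fuel →
      1 ≤ n → 2 * last = 2 * l + n * (n - 1) →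
      6 * total = 6 * (n * l) + n * (n + 1) * (n - 1) →
      mbScan r S high n best last total = if n ≤ high ∧ n ≤ t then min t high else best := by
  intro fuel
  induction fuel with
  | zero =>
    intro n best last total hf h1 hlast htotal
    rw [mbScan]
    have h : ¬ n ≤ high := by omega
    simp [h]
  | succ f ih =>
    intro n best last total hf h1 hlast htotal
    rw [mbScan]
    by_cases hnh : n ≤ high
    case neg =>
      rw [dif_neg hnh, if_neg (by omega)]
    rw [dif_pos hnh]
    dsimp only
    have hiff : (last ≤ r ∧ total ≤ S) ↔ Qfeas l r S n := by
      unfold Qfeas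
      constructor <;> intro h <;> constructor <;> omega
    have hlast' : 2 * (last + n) = 2 * l + (n + 1) * (n + 1 - 1) := by linear_combination hlast
    have htotal' : 6 * (total + (last + n)) = 6 * ((n + 1) * l) + (n + 1) * (n + 1 + 1) * (n + 1 - 1) := by
      linear_combination htotal + 3 * hlast
    by_cases hfeas : last ≤ r ∧ total ≤ S
    · rw [if_pos hfeas]
      have hnt : n ≤ t := (ht n (by omega) (by omega)).mp (hiff.mp hfeas)
      rw [ih (n + 1) n (last + n) (total + (last + n)) (by omega) (by omega) hlast' htotal']
      split_ifs <;> omega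
    · rw [if_neg hfeas]
      have hnt : ¬ n ≤ t := fun hle => hfeas (hiff.mpr ((ht n (by omega) (by omega)).mpr hle))
      rw [ih (n + 1) best (last + n) (total + (last + n)) (by omega) (by omega) hlast' htotal']
      split_ifs <;> omega

-- a threshold exists whenever Qfeas is downward closed on [1, H]
lemma exists_thresh (l r S H : Int)
    (hmono : ∀ n, 1 ≤ n → n + 1 ≤ H → Qfeas l r S (n + 1) → Qfeas l r S n) :
    ∃ t, ∀ n, 1 ≤ n → n ≤ H → (Qfeas l r S n ↔ n ≤ t) := by
  classical
  have hdesc : ∀ (k : Nat) (a : Int), 1 ≤ a → a + k ≤ H → Qfeas l r S (a + k) → Qfeas l r S a := by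
    intro k
    induction k with
    | zero => intro a _ _ h; simpa using h
    | succ m ih =>
      intro a ha haH h
      apply ih a ha (by omega)
      have hstep := hmono (a + m) (by omega) (by push_cast at haH ⊢; omega)
      apply hstep
      have heq : a + ((m + 1 : Nat) : Int) = a + (m : Int) + 1 := by push_cast; ring
      rw [heq] at h
      exact h
  by_cases hne : ((Finset.Icc 1 H).filter (fun n => Qfeas l r S n)).Nonempty
  · set tm := ((Finset.Icc 1 H).filter (fun n => Qfeas l r S n)).max' hne with htm
    obtain ⟨⟨hm1, hmH⟩, hmQ⟩ : (1 ≤ tm ∧ tm ≤ H) ∧ Qfeas l r S tm := by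
      have hmem := ((Finset.Icc 1 H).filter (fun n => Qfeas l r S n)).max'_mem hne
      rw [Finset.mem_filter, Finset.mem_Icc] at hmem
      exact hmem
    refine ⟨tm, fun n h1 hH2 => ?_⟩
    constructor
    · intro hq
      exact Finset.le_max' _ n (by rw [Finset.mem_filter, Finset.mem_Icc]; exact ⟨⟨h1, hH2⟩, hq⟩)
    · intro hle
      have hQm : Qfeas l r S (n + ((tm - n).toNat : Int)) := by
        have heq : n + ((tm - n).toNat : Int) = tm := by omega
        rw [heq]; exact hmQ
      exact hdesc _ n h1 (by omega) hQm
  · refine ⟨0, fun n h1 hH2 => ?_⟩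
    constructor
    · intro hq
      exact absurd ⟨n, by rw [Finset.mem_filter, Finset.mem_Icc]; exact ⟨⟨h1, hH2⟩, hq⟩⟩ hne
    · omega

lemma Q_mono (l r S : Int) (hl : 1 ≤ l) (n : Int) (hn : 1 ≤ n) :
    Qfeas l r S (n + 1) → Qfeas l r S n := by
  intro ⟨h1, h2⟩
  constructor
  · nlinarith
  · nlinarith

lemma fdiv_nonpos (S l : Int) (hl : l ≤ -1) (hS : l + 1 ≤ S) :
    PySem.Int.floordiv S l ≤ 0 := by
  by_contra hq
  have hmul := PySem.Int.floordiv_mul_add_mod S l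
  have hmod := PySem.Int.mod_neg_bounds (a := S) (b := l) (by omega)
  nlinarith [hmod.1, hmod.2]

lemma fdiv_self_neg (l : Int) (hl : l ≤ -1) : PySem.Int.floordiv l l = 1 := by
  have hmul := PySem.Int.floordiv_mul_add_mod l l
  have hmod := PySem.Int.mod_neg_bounds (a := l) (b := l) (by omega)
  by_contra hq
  rcases lt_or_gt_of_ne hq with h | h
  · nlinarith [hmod.1, hmod.2]
  · nlinarith [hmod.1, hmod.2]

lemma fdiv_pos_of_le (S l : Int) (hl : l ≤ -1) (hS : S ≤ l - 1) :
    1 ≤ PySem.Int.floordiv S l := by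
  have hmul := PySem.Int.floordiv_mul_add_mod S l
  have hmod := PySem.Int.mod_neg_bounds (a := S) (b := l) (by omega)
  by_contra hq
  nlinarith [hmod.1, hmod.2]

-- any feasible length is at least S // l (the total-sum side alone forces this)
lemma feas_ge_fdiv (l S n : Int) (hl : l ≤ -1) (hn : 1 ≤ n)
    (h : 6 * (n * l) + n * (n + 1) * (n - 1) ≤ 6 * S) :
    PySem.Int.floordiv S l ≤ n := by
  obtain ⟨q, hq⟩ : ∃ q, q = PySem.Int.floordiv S l := ⟨_, rfl⟩
  obtain ⟨ρ, hρ⟩ : ∃ ρ, ρ = PySem.Int.mod S l := ⟨_, rfl⟩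
  have hmul : q * l + ρ = S := by rw [hq, hρ]; exact PySem.Int.floordiv_mul_add_mod S l
  have hmod : l < ρ ∧ ρ ≤ 0 := by
    rw [hρ]; exact PySem.Int.mod_neg_bounds (a := S) (b := l) (by omega)
  have hcube : 0 ≤ n * (n + 1) * (n - 1) :=
    mul_nonneg (mul_nonneg (by omega) (by omega)) (by omega)
  rw [← hq]
  nlinarith [hmod.2]

-- at exactly q = S // l the total-sum condition already fails in the region S < l
lemma feas_at_fdiv_false (l r S : Int) (hl : l ≤ -1) (hS : S ≤ l - 1)
    (h : 6 * (PySem.Int.floordiv S l * l) + PySem.Int.floordiv S l * (PySem.Int.floordiv S l + 1) * (PySem.Int.floordiv S l - 1) ≤ 6 * S) :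
    False := by
  obtain ⟨q, hq⟩ : ∃ q, q = PySem.Int.floordiv S l := ⟨_, rfl⟩
  obtain ⟨ρ, hρ⟩ : ∃ ρ, ρ = PySem.Int.mod S l := ⟨_, rfl⟩
  have hmul : q * l + ρ = S := by rw [hq, hρ]; exact PySem.Int.floordiv_mul_add_mod S l
  have hmod : l < ρ ∧ ρ ≤ 0 := by
    rw [hρ]; exact PySem.Int.mod_neg_bounds (a := S) (b := l) (by omega)
  have hq1 : 1 ≤ q := by rw [hq]; exact fdiv_pos_of_le S l hl hS
  rw [← hq] at h
  rcases eq_or_lt_of_le hq1 with h1 | h2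
  · rw [← h1] at h hmul
    nlinarith [hmod.2]
  · have hc6 : 6 ≤ q * (q + 1) * (q - 1) := by
      have e1 : 0 ≤ (q - 2) * ((q + 1) * (q - 1)) :=
        mul_nonneg (by omega) (mul_nonneg (by omega) (by omega))
      have e2 : 0 ≤ (q - 2) * (q + 2) := mul_nonneg (by omega) (by omega)
      nlinarith [e1, e2]
    nlinarith

-- below the sum cap, every length is infeasible on the total-sum side
lemma sum_infeasible (l S m : Int) (hl : l ≤ -1) (hS : S ≤ l - 1) (hm : 1 ≤ m)
    (hbound : 2 * m ≤ PySem.Int.floordiv S l + 2) :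
    6 * S < 6 * (m * l) + m * (m + 1) * (m - 1) := by
  obtain ⟨q, hq⟩ : ∃ q, q = PySem.Int.floordiv S l := ⟨_, rfl⟩
  obtain ⟨ρ, hρ⟩ : ∃ ρ, ρ = PySem.Int.mod S l := ⟨_, rfl⟩
  have hmul : q * l + ρ = S := by rw [hq, hρ]; exact PySem.Int.floordiv_mul_add_mod S l
  have hmod : l < ρ ∧ ρ ≤ 0 := by
    rw [hρ]; exact PySem.Int.mod_neg_bounds (a := S) (b := l) (by omega)
  have hq1 : 1 ≤ q := by rw [hq]; exact fdiv_pos_of_le S l hl hS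
  rw [← hq] at hbound
  have hmq : m ≤ q := by omega
  have hcube : 0 ≤ m * (m + 1) * (m - 1) :=
    mul_nonneg (mul_nonneg (by omega) (by omega)) (by omega)
  rcases eq_or_lt_of_le hmq with heq | hlt
  · subst heq
    rcases eq_or_lt_of_le hm with h1 | h2
    · have hm1 : m = 1 := h1.symm
      subst hm1
      have hρneg : ρ ≤ -1 := by nlinarith
      nlinarith
    · have hc6 : 6 ≤ m * (m + 1) * (m - 1) := by
        have e1 : 0 ≤ (m - 2) * ((m + 1) * (m - 1)) :=
          mul_nonneg (by omega) (mul_nonneg (by omega) (by omega))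
        have e2 : 0 ≤ (m - 2) * (m + 2) := mul_nonneg (by omega) (by omega)
        nlinarith [e1, e2]
      nlinarith [hmod.2]
  · have hgap : 6 ≤ 6 * (m * l) - 6 * (q * l) := by nlinarith
    nlinarith [hmod.2]

-- A's binary search returns `best` unchanged when every midpoint it can probe is infeasible
lemma mbLoop_all_miss (l r S h0 : Int)
    (hmiss : ∀ m, 1 ≤ m → 2 * m ≤ h0 + 1 → is_length_feasible l r S m = false) :
    ∀ (fuel : Nat) (high best : Int), (high + 1 - 1).toNat ≤ fuel → high ≤ h0 →
      mbLoop l r S 1 high best = best := by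
  intro fuel
  induction fuel with
  | zero =>
    intro high best hf hH
    rw [mbLoop, dif_neg (by omega)]
  | succ f ih =>
    intro high best hf hH
    by_cases h1h : (1:Int) ≤ high
    case neg => rw [mbLoop, dif_neg h1h]
    have hmid := PySem.Int.floordiv_two_mid_bounds h1h
    have hmul := PySem.Int.floordiv_mul_add_mod (1 + high) 2
    have hmod0 := PySem.Int.mod_nonneg (a := 1 + high) (b := 2) (by omega)
    have hmod1 := PySem.Int.mod_lt (a := 1 + high) (b := 2) (by omega)
    rw [mbLoop, dif_pos h1h]
    set mid := PySem.Int.floordiv (1 + high) 2 with hmiddef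
    dsimp only
    rw [hmiss mid (by omega) (by omega)]
    simp only [Bool.false_eq_true, if_false]
    exact ih (mid - 1) best (by omega) (by omega)

-- B's scan never decreases below the running best
lemma mbScan_ge_best (r S high : Int) :
    ∀ (fuel : Nat) (n best last total : Int), (high + 1 - n).toNat ≤ fuel → best ≤ n →
      best ≤ mbScan r S high n best last total := by
  intro fuel
  induction fuel with
  | zero =>
    intro n best last total hf hb
    rw [mbScan, dif_neg (by omega)]
  | succ f ih =>
    intro n best last total hf hb
    by_cases hnh : n ≤ high
    case neg => rw [mbScan, dif_neg hnh]
    rw [mbScan, dif_pos hnh]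
    dsimp only
    have h1 : best ≤ (if last ≤ r ∧ total ≤ S then n else best) := by split_ifs <;> omega
    have h2 : (if last ≤ r ∧ total ≤ S then n else best) ≤ n + 1 := by split_ifs <;> omega
    exact le_trans h1 (ih (n + 1) _ (last + n) (total + (last + n)) (by omega) h2)

-- B's scan reaches any feasible length within range
lemma mbScan_hits (l r S high n0 : Int) (hQ : Qfeas l r S n0) (hn0 : n0 ≤ high) :
    ∀ (fuel : Nat) (n best last total : Int), (high + 1 - n).toNat ≤ fuel →
      1 ≤ n → n ≤ n0 → best ≤ n →
      2 * last = 2 * l + n * (n - 1) → 6 * total = 6 * (n * l) + n * (n + 1) * (n - 1) →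
      n0 ≤ mbScan r S high n best last total := by
  intro fuel
  induction fuel with
  | zero =>
    intro n best last total hf h1 hn hb hlast htotal
    omega
  | succ f ih =>
    intro n best last total hf h1 hn hb hlast htotal
    have hnh : n ≤ high := by omega
    rw [mbScan, dif_pos hnh]
    dsimp only
    have hlast' : 2 * (last + n) = 2 * l + (n + 1) * (n + 1 - 1) := by linear_combination hlast
    have htotal' : 6 * (total + (last + n)) = 6 * ((n + 1) * l) + (n + 1) * (n + 1 + 1) * (n + 1 - 1) := by
      linear_combination htotal + 3 * hlast
    rcases eq_or_lt_of_le hn with heq | hlt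
    · have hcond : last ≤ r ∧ total ≤ S := by
        subst heq
        obtain ⟨hq1, hq2⟩ := hQ
        constructor <;> omega
      rw [if_pos hcond]
      calc n0 = n := heq.symm
        _ ≤ mbScan r S high (n + 1) n (last + n) (total + (last + n)) :=
            mbScan_ge_best r S high f (n + 1) n (last + n) (total + (last + n)) (by omega) (by omega)
    · have hble : (if last ≤ r ∧ total ≤ S then n else best) ≤ n + 1 := by split_ifs <;> omega
      exact ih (n + 1) _ (last + n) (total + (last + n)) (by omega) (by omega) (by omega) hble hlast' htotal'

-- a length whose last rung fits under upper_bound is below A's range-derived cap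
lemma le_ufr (w n : Int) (hw : 0 ≤ w) (hn : 1 ≤ n) (h : n * (n - 1) ≤ 2 * w) :
    n ≤ PySem.Int.floordiv (1 + pyIsqrt (1 + 8 * w)) 2 + 2 := by
  set sn := Nat.sqrt (1 + 8 * w).toNat with hsn
  have hcast : ((1 + 8 * w).toNat : Int) = 1 + 8 * w := by omega
  have hs1 : ((sn : Int)) * (sn : Int) ≤ 1 + 8 * w := by
    have h1 := Nat.sqrt_le' (1 + 8 * w).toNat
    rw [pow_two] at h1
    calc ((sn : Int)) * (sn : Int) = ((sn * sn : Nat) : Int) := by push_cast; ring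
      _ ≤ ((1 + 8 * w).toNat : Int) := by exact_mod_cast h1
      _ = 1 + 8 * w := hcast
  have hs2 : 1 + 8 * w < ((sn : Int) + 1) * ((sn : Int) + 1) := by
    have h2 := Nat.lt_succ_sqrt' (1 + 8 * w).toNat
    rw [Nat.succ_eq_add_one, pow_two] at h2
    calc 1 + 8 * w = ((1 + 8 * w).toNat : Int) := hcast.symm
      _ < (((sn + 1) * (sn + 1) : Nat) : Int) := by exact_mod_cast h2
      _ = ((sn : Int) + 1) * ((sn : Int) + 1) := by push_cast; ring
  have hsq : (2 * n - 1) * (2 * n - 1) ≤ 1 + 8 * w := by nlinarith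
  have h2n : 2 * n - 1 < (sn : Int) + 1 := by nlinarith [hs2, hsq]
  have hfl : n ≤ PySem.Int.floordiv (1 + (sn : Int)) 2 := by
    rw [PySem.Int.le_floordiv_iff_mul_le (by omega)]
    omega
  have hpy : pyIsqrt (1 + 8 * w) = (sn : Int) := by rw [pyIsqrt, hsn]
  rw [hpy]
  omega

lemma witness_high :
    min (PySem.Int.floordiv (1 + pyIsqrt (1 + 8 * ((-7:Int) - (-8)))) 2 + 2)
        (PySem.Int.floordiv (-15) (-8) + 1) = 2 := by
  have h9 : (1 + 8 * ((-7:Int) - (-8))) = 9 := by norm_num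
  have hsq : pyIsqrt 9 = 3 := by
    rw [pyIsqrt]
    have h9' : (9:Int).toNat = 9 := by decide
    rw [h9']
    norm_num
  rw [h9, hsq]
  decide

lemma witness_A : maximum_beacons (-8) (-7) (-15) = 1 := by
  show mbLoop (-8) (-7) (-15) 1
      (min (PySem.Int.floordiv (1 + pyIsqrt (1 + 8 * ((-7:Int) - (-8)))) 2 + 2)
           (PySem.Int.floordiv (-15) (-8) + 1)) 1 = 1
  rw [witness_high]
  have e0 : PySem.Int.floordiv ((1:Int) + 2) 2 = 1 := by decide
  rw [mbLoop, dif_pos (by decide : (1:Int) ≤ 2)]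
  simp only [e0]
  rw [if_neg (by decide)]
  rw [mbLoop, dif_neg (by decide)]

lemma witness_B : maximum_beacons_alt (-8) (-7) (-15) = 2 := by
  show mbScan (-7) (-15)
      (min (PySem.Int.floordiv (1 + pyIsqrt (1 + 8 * ((-7:Int) - (-8)))) 2 + 2)
           (PySem.Int.floordiv (-15) (-8) + 1)) 1 1 (-8) (-8) = 2
  rw [witness_high]
  rw [mbScan, dif_pos (by decide)]
  simp only []
  rw [if_neg (by decide)]
  rw [mbScan, dif_pos (by decide)]
  simp only []
  rw [if_pos (by decide)]
  rw [mbScan, dif_neg (by decide)]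
  decide

-- ===== VERDICT (by name: the statement is the Claim_ definition above) =====
theorem maximum_beacons_spec : Claim_unchanged_maximum_beacons := by
  intro l r S _ hpre hnd
  obtain ⟨hl0, hlr⟩ := hpre
  unfold D_maximum_beacons at hnd
  show maximum_beacons l r S = maximum_beacons_alt l r S
  unfold maximum_beacons maximum_beacons_alt
  set h0 := min (PySem.Int.floordiv (1 + pyIsqrt (1 + 8 * (r - l))) 2 + 2)
               (PySem.Int.floordiv S l + 1) with hh0
  have hmin : h0 ≤ PySem.Int.floordiv S l + 1 := min_le_right _ _
  obtain ⟨t, ht⟩ : ∃ t, ∀ n, 1 ≤ n → n ≤ h0 → (Qfeas l r S n ↔ n ≤ t) := by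
    by_cases hl : 1 ≤ l
    · exact exists_thresh l r S h0 (fun n hn _ => Q_mono l r S hl n hn)
    have hl' : l ≤ -1 := by omega
    rcases lt_trichotomy S l with hSlt | hSeq | hSgt
    · -- S < l, and ¬D gives: no feasible length n ≥ 2 within the sum cap
      have hnex : ¬ Qfeas l r S (PySem.Int.floordiv S l + 1) :=
        fun hex => hnd ⟨by omega, hSlt, hex.1, hex.2⟩
      refine ⟨0, ?_⟩
      intro n h1 hH
      refine ⟨fun hq => ?_, by omega⟩
      exfalso
      rcases eq_or_lt_of_le h1 with h1e | h2le
      · obtain ⟨_, hq2⟩ := hq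
        rw [← h1e] at hq2
        nlinarith
      · have hge := feas_ge_fdiv l S n hl' (by omega) hq.2
        have hcases : n = PySem.Int.floordiv S l ∨ n = PySem.Int.floordiv S l + 1 := by omega
        rcases hcases with h | h
        · exact feas_at_fdiv_false l r S hl' (by omega) (h ▸ hq.2)
        · exact hnex (h ▸ hq)
    · -- S = l: the cap is at most 2 and length 1 is always feasible
      have hq1 : PySem.Int.floordiv S l = 1 := by rw [hSeq]; exact fdiv_self_neg l hl'
      have hQ1 : Qfeas l r S 1 := by constructor <;> nlinarith
      refine exists_thresh l r S h0 (fun n hn hn1 _ => ?_)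
      have : n = 1 := by omega
      rw [this]
      exact hQ1
    · -- S > l: the cap is at most 1
      have hq := fdiv_nonpos S l hl' (by omega)
      exact exists_thresh l r S h0 (fun n hn hn1 => by omega)
  rw [mbLoop_thresh l r S t h0 ht (h0 + 1 - 1).toNat 1 h0 1 (by omega) (by omega) (le_refl h0),
      mbScan_thresh l r S t h0 h0 ht (le_refl h0) (h0 + 1 - 1).toNat 1 1 l l (by omega) (by omega)
        (by ring) (by ring)]

theorem maximum_beacons_changed : Claim_changed_maximum_beacons := by
  unfold Claim_changed_maximum_beacons
  exact ⟨by decide, by decide, by decide, witness_A, witness_B, by decide⟩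

theorem maximum_beacons_tight : Claim_exact_maximum_beacons := by
  intro l r S _ hpre hD
  obtain ⟨hl0, hlr⟩ := hpre
  obtain ⟨hlneg, hSl, hfe⟩ := hD
  have hq1 : 1 ≤ PySem.Int.floordiv S l := fdiv_pos_of_le S l (by omega) (by omega)
  obtain ⟨n, hn2, hnq, hr, hs⟩ : ∃ n, 2 ≤ n ∧ n ≤ PySem.Int.floordiv S l + 1 ∧
      2 * l + n * (n - 1) ≤ 2 * r ∧ 6 * (n * l) + n * (n + 1) * (n - 1) ≤ 6 * S :=
    ⟨PySem.Int.floordiv S l + 1, by omega, by omega, hfe.1, hfe.2⟩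
  show maximum_beacons l r S ≠ maximum_beacons_alt l r S
  unfold maximum_beacons maximum_beacons_alt
  show mbLoop l r S 1 (min (PySem.Int.floordiv (1 + pyIsqrt (1 + 8 * (r - l))) 2 + 2)
          (PySem.Int.floordiv S l + 1)) 1
     ≠ mbScan r S (min (PySem.Int.floordiv (1 + pyIsqrt (1 + 8 * (r - l))) 2 + 2)
          (PySem.Int.floordiv S l + 1)) 1 1 l l
  set h0 := min (PySem.Int.floordiv (1 + pyIsqrt (1 + 8 * (r - l))) 2 + 2)
               (PySem.Int.floordiv S l + 1) with hh0
  have hminr : h0 ≤ PySem.Int.floordiv S l + 1 := min_le_right _ _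
  have hA : mbLoop l r S 1 h0 1 = 1 := by
    refine mbLoop_all_miss l r S h0 ?_ (h0 + 1 - 1).toNat h0 1 (by omega) (le_refl h0)
    intro m h1m h2m
    rw [Bool.eq_false_iff]
    intro htrue
    obtain ⟨_, hq2⟩ := (feas_iff l r S m).mp htrue
    have := sum_infeasible l S m (by omega) (by omega) h1m (by omega)
    omega
  have hnh0 : n ≤ h0 := by
    have h1 : n ≤ PySem.Int.floordiv (1 + pyIsqrt (1 + 8 * (r - l))) 2 + 2 :=
      le_ufr (r - l) n (by omega) (by omega) (by nlinarith)
    omega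
  have hB : n ≤ mbScan r S h0 1 1 l l := by
    refine mbScan_hits l r S h0 n ⟨hr, hs⟩ hnh0 (h0 + 1 - 1).toNat 1 1 l l (by omega)
      (by omega) (by omega) (by omega) (by ring) (by ring)
  omega
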